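-- pv_equiv track=rewrite | github.com/akhilub/DSA-Coding-Patterns | Online_Assessment/Turing/A.py | solution
-- ===== SOURCE A (Python) =====
-- def solution(cards):
--     # Create points map
--     points_map = {}
--     for card in cards:
--         points_map[card] = points_map.get(card, 0) + card
--
--     # Sort unique values
--     values = sorted(points_map.keys())
--     n = len(values)
--     dp = [0] * n
--
--     # Base case
--     dp[0] = points_map[values[0]]
--     if n == 1:
--         return dp[0]
--
--     # Fill dp array
--     for i in range(n):
--         curr_points = points_map[values[i]]
--         valid_prev = 0
--
--         # Find last valid value we can combine with
--         for j in range(i-1, -1, -1):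
--             if values[i] - values[j] > 2:
--                 valid_prev = dp[j]
--                 break
--
--         dp[i] = max(dp[i-1], valid_prev + curr_points)
--
--     return dp[n-1]
-- ===== SOURCE B (Python) =====
-- def solution(cards):
--     # Binary search for the last combinable value instead of A's backward scan.
--     totals = {}
--     for c in cards:
--         totals[c] = totals.get(c, 0) + c
--     values = sorted(totals)
--     dp = []
--     for i, v in enumerate(values):
--         # least lo in [0, i] with values[lo] >= v - 2  (hand-rolled bisect_left)
--         lo, hi = 0, i
--         while lo < hi:
--             mid = (lo + hi) // 2
--             if values[mid] < v - 2:
--                 lo = mid + 1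
--             else:
--                 hi = mid
--         take = (dp[lo - 1] if lo > 0 else 0) + totals[v]
--         skip = dp[-1] if dp else 0
--         dp.append(max(skip, take))
--     return dp[-1] if dp else 0
-- ===== Notes on version B (the rewrite author's own statement) =====
-- stated objective: alternative
-- what changed: Replaces A's per-value backward linear scan with a binary search over the sorted unique values, and builds the dp list by appending instead of preallocating and indexing.
-- intended difference: On nonempty lists whose elements are all one equal negative value A returns that negative total, while B returns 0; B is intended because deleting nothing (0 points) is always allowed, and A itself never returns a negative total once two distinct values exist. — e.g. on solution([-1]): A returns -1, B returns 0
import Mathlib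
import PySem

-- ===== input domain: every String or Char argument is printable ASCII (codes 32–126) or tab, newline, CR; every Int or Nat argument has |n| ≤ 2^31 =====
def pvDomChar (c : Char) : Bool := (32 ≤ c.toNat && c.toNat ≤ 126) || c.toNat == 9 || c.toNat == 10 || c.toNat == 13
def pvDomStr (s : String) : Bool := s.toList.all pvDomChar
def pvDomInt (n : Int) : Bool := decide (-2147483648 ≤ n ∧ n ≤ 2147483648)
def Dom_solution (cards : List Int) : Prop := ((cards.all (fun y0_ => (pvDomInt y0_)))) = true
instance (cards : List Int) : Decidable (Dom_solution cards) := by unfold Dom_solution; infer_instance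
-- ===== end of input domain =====

-- B replaces A's per-value backward scan by a hand-rolled binary search over the sorted unique
-- values and grows the dp list by appending instead of preallocating; return-value equivalence only.

-- ===== PORT A =====
-- inner backward scan: `for j in range(i-1,-1,-1): if vi - values[j] > 2: valid_prev = dp[j]; break`
def aScan (values dp : List Int) (vi : Int) : List Int → Int
  | [] => 0
  | j :: rest =>
    if vi - (PySem.List.pyGet? values j).getD 0 > 2 then (PySem.List.pyGet? dp j).getD 0
    else aScan values dp vi rest

def solution (cards : List Int) : Int :=
  let pm := cards.foldl (fun d c => d.insert c (d.getD c 0 + c)) (PySem.Dict.empty (κ := Int) (ν := Int))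
  let values := PySem.List.sorted pm.keys (fun x => x) false
  let n := values.length
  let dp0 := List.replicate n (0 : Int)
  let dp1 := PySem.List.pySetD dp0 0 (pm.getD ((PySem.List.pyGet? values 0).getD 0) 0)
  if n = 1 then (PySem.List.pyGet? dp1 0).getD 0
  else
    let dpF := (PySem.List.pyRange 0 (n : Int) 1).foldl (fun dp i =>
      let vi := (PySem.List.pyGet? values i).getD 0
      let curr := pm.getD vi 0
      let validPrev := aScan values dp vi (PySem.List.pyRange (i - 1) (-1) (-1))
      PySem.List.pySetD dp i (max ((PySem.List.pyGet? dp (i - 1)).getD 0) (validPrev + curr))) dp1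
    (PySem.List.pyGet? dpF ((n : Int) - 1)).getD 0

-- ===== PORT B =====
-- Source B's while-loop: least lo in [0, hi) with values[lo] >= v - 2 (hand-rolled bisect_left)
def bsGo (values : List Int) (v : Int) : Nat → Nat → Nat → Nat
  | 0, lo, _ => lo
  | fuel + 1, lo, hi =>
    if lo < hi then
      if (PySem.List.pyGet? values (((lo + hi) / 2 : Nat) : Int)).getD 0 < v - 2 then
        bsGo values v fuel ((lo + hi) / 2 + 1) hi
      else
        bsGo values v fuel lo ((lo + hi) / 2)
    else lo

def bsLoop (values : List Int) (v : Int) (lo hi : Nat) : Nat :=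
  bsGo values v (hi - lo) lo hi

def solution_alt (cards : List Int) : Int :=
  let totals := cards.foldl (fun d c => d.insert c (d.getD c 0 + c)) (PySem.Dict.empty (κ := Int) (ν := Int))
  let values := PySem.List.sorted totals.keys (fun x => x) false
  let dp := (PySem.List.enumerate values 0).foldl (fun dp iv =>
    let lo := bsLoop values iv.2 0 iv.1.toNat
    let take := (if 0 < lo then (PySem.List.pyGet? dp ((lo : Int) - 1)).getD 0 else 0) + totals.getD iv.2 0
    let skip := if dp.isEmpty then 0 else (PySem.List.pyGet? dp (-1)).getD 0
    dp ++ [max skip take]) ([] : List Int)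
  if dp.isEmpty then 0 else (PySem.List.pyGet? dp (-1)).getD 0

-- ===== PRECONDITION & SPEC =====
-- Pre_ excludes only the empty list, on which A raises IndexError (values[0]).
def Pre_solution (cards : List Int) : Prop := cards ≠ []
instance (cards : List Int) : Decidable (Pre_solution cards) := by unfold Pre_solution; infer_instance
def pvWitness_solution : List Int := [2, 2, 3, 4, 7]

-- On nonempty lists whose elements are all equal to one negative value, A returns that negative
-- total while B returns 0; B is intended because deleting nothing (0 points) is always allowed —
-- A itself never returns a negative total as soon as there are two distinct values.
def D_solution (cards : List Int) : Prop :=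
  cards ≠ [] ∧ (∀ c ∈ cards, c = cards.headI) ∧ cards.headI < 0
instance (cards : List Int) : Decidable (D_solution cards) := by unfold D_solution; infer_instance

def Spec_solution (cards : List Int) (out : Int) : Prop := ¬ D_solution cards → out = solution_alt cards
instance (cards : List Int) (out : Int) : Decidable (Spec_solution cards out) := by unfold Spec_solution; infer_instance

def pvDiffWitness_solution : List Int := [-1]
def pvDiffWitnessOut_solution : Int × Int := (-1, 0)

-- ===== CLAIM (what is proved, stated in full; the proofs are below) =====
def Claim_unchanged_solution : Prop :=
  ∀ (cards : List Int), Dom_solution cards → Pre_solution cards → Spec_solution cards (solution cards)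
def Claim_changed_solution : Prop :=
  Dom_solution (pvDiffWitness_solution) ∧ Pre_solution (pvDiffWitness_solution) ∧ D_solution (pvDiffWitness_solution) ∧ solution (pvDiffWitness_solution) = pvDiffWitnessOut_solution.1 ∧ solution_alt (pvDiffWitness_solution) = pvDiffWitnessOut_solution.2 ∧ pvDiffWitnessOut_solution.1 ≠ pvDiffWitnessOut_solution.2
def Claim_exact_solution : Prop :=
  ∀ (cards : List Int), Dom_solution cards → Pre_solution cards → D_solution cards → solution cards ≠ solution_alt cards

-- ===== LEMMAS AND PROOFS =====

-- proof-side names for the pieces both ports share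
def pmOf (cards : List Int) : PySem.Dict Int Int :=
  cards.foldl (fun d c => d.insert c (d.getD c 0 + c)) (PySem.Dict.empty (κ := Int) (ν := Int))

def valsOf (cards : List Int) : List Int :=
  PySem.List.sorted (pmOf cards).keys (fun x => x) false

def fOf (cards : List Int) : Int → Int := fun v => (pmOf cards).getD v 0

-- the two loop bodies, abstracted over the value table f
def stepA (values : List Int) (f : Int → Int) (dp : List Int) (i : Int) : List Int :=
  let vi := (PySem.List.pyGet? values i).getD 0
  let curr := f vi
  let validPrev := aScan values dp vi (PySem.List.pyRange (i - 1) (-1) (-1))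
  PySem.List.pySetD dp i (max ((PySem.List.pyGet? dp (i - 1)).getD 0) (validPrev + curr))

def stepB (values : List Int) (f : Int → Int) (dp : List Int) (iv : Int × Int) : List Int :=
  let lo := bsLoop values iv.2 0 iv.1.toNat
  let take := (if 0 < lo then (PySem.List.pyGet? dp ((lo : Int) - 1)).getD 0 else 0) + f iv.2
  let skip := if dp.isEmpty then 0 else (PySem.List.pyGet? dp (-1)).getD 0
  dp ++ [max skip take]

def dpInit (values : List Int) (f : Int → Int) : List Int :=
  PySem.List.pySetD (List.replicate values.length (0 : Int)) 0 (f ((PySem.List.pyGet? values 0).getD 0))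

def AfoldK (values : List Int) (f : Int → Int) (k : Nat) : List Int :=
  (PySem.List.pyRange 0 (k : Int) 1).foldl (stepA values f) (dpInit values f)

def BfoldK (values : List Int) (f : Int → Int) (k : Nat) : List Int :=
  ((PySem.List.enumerate values 0).take k).foldl (stepB values f) []

lemma solution_eq (cards : List Int) :
    solution cards =
      if (valsOf cards).length = 1 then
        (PySem.List.pyGet? (dpInit (valsOf cards) (fOf cards)) 0).getD 0
      else
        (PySem.List.pyGet? (AfoldK (valsOf cards) (fOf cards) (valsOf cards).length)
          (((valsOf cards).length : Int) - 1)).getD 0 := rfl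

lemma alt_eq (cards : List Int) :
    solution_alt cards =
      if (BfoldK (valsOf cards) (fOf cards) (valsOf cards).length).isEmpty then 0
      else (PySem.List.pyGet? (BfoldK (valsOf cards) (fOf cards) (valsOf cards).length) (-1)).getD 0 := by
  have h : (PySem.List.enumerate (valsOf cards) 0).take (valsOf cards).length
      = PySem.List.enumerate (valsOf cards) 0 := by
    conv_lhs => rw [← PySem.List.length_enumerate (valsOf cards) 0]
    exact List.take_length
  unfold BfoldK
  rw [h]
  rfl

lemma keys_pm (cards : List Int) : (pmOf cards).keys = PySem.Set.ofList cards := by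
  unfold pmOf
  rw [PySem.Dict.keys_foldl_insert]
  rw [show (PySem.Dict.empty (κ := Int) (ν := Int)).keys = [] from rfl]
  exact PySem.Set.update_nil_left cards

lemma mem_vals (cards : List Int) (x : Int) : x ∈ valsOf cards ↔ x ∈ cards := by
  unfold valsOf
  rw [PySem.List.mem_sorted, keys_pm, PySem.Set.mem_ofList]

lemma nodup_vals (cards : List Int) : (valsOf cards).Nodup := by
  have hperm := PySem.List.sorted_perm (pmOf cards).keys (fun x : Int => x) false
  have hnd : (pmOf cards).keys.Nodup := by rw [keys_pm]; exact PySem.Set.nodup_ofList cards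
  exact hperm.nodup_iff.mpr hnd

lemma sorted_vals (cards : List Int) : (valsOf cards).Pairwise (· ≤ ·) :=
  PySem.List.sorted_pairwise (pmOf cards).keys (fun x : Int => x)

lemma pm_getD (l : List Int) : ∀ (d : PySem.Dict Int Int) (x : Int),
    (l.foldl (fun d c => d.insert c (d.getD c 0 + c)) d).getD x 0
      = d.getD x 0 + x * l.count x := by
  induction l with
  | nil => intro d x; simp
  | cons c cs ih =>
    intro d x
    rw [List.foldl_cons, ih, PySem.Dict.getD_insert]
    rcases eq_or_ne x c with h | h
    · subst h; simp; ring
    · simp [h, Ne.symm h]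

lemma pm_getD' (cards : List Int) (x : Int) :
    (pmOf cards).getD x 0 = x * cards.count x := by
  unfold pmOf; rw [pm_getD]; simp

lemma mono_vals (values : List Int) (hp : values.Pairwise (· ≤ ·)) (i j : Nat)
    (hij : i ≤ j) (hj : j < values.length) :
    values[i]'(Nat.lt_of_le_of_lt hij hj) ≤ values[j] := by
  rcases Nat.eq_or_lt_of_le hij with h | h
  · subst h; exact le_refl _
  · exact List.pairwise_iff_getElem.mp hp i j (Nat.lt_of_le_of_lt hij hj) hj h

lemma bsGo_correct (values : List Int) (v : Int) (hp : values.Pairwise (· ≤ ·)) (k : Nat)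
    (hk : k ≤ values.length) :
    ∀ (fuel lo hi : Nat), hi ≤ k → lo ≤ hi → hi - lo ≤ fuel →
    (∀ j (hj : j < values.length), j < lo → values[j] < v - 2) →
    (∀ j (hj : j < values.length), hi ≤ j → j < k → ¬(values[j] < v - 2)) →
    lo ≤ bsGo values v fuel lo hi ∧ bsGo values v fuel lo hi ≤ hi ∧
    (∀ j (hj : j < values.length), j < bsGo values v fuel lo hi → values[j] < v - 2) ∧
    (∀ j (hj : j < values.length), bsGo values v fuel lo hi ≤ j → j < k → ¬(values[j] < v - 2)) := by
  intro fuel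
  induction fuel with
  | zero =>
    intro lo hi h1 h2 h3 hP hNP
    simp only [bsGo]
    exact ⟨le_rfl, h2, hP, fun j hj hle hlt => hNP j hj (by omega) hlt⟩
  | succ fuel ih =>
    intro lo hi h1 h2 h3 hP hNP
    simp only [bsGo]
    by_cases hlh : lo < hi
    · rw [if_pos hlh]
      have hmlo : lo ≤ (lo + hi) / 2 := by omega
      have hmhi : (lo + hi) / 2 < hi := by omega
      have hmlen : (lo + hi) / 2 < values.length := by omega
      have hval : (PySem.List.pyGet? values (((lo + hi) / 2 : Nat) : Int)).getD 0
          = values[(lo + hi) / 2] := by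
        rw [PySem.List.pyGet?_natCast, List.getElem?_eq_getElem hmlen]; rfl
      rw [hval]
      by_cases hc : values[(lo + hi) / 2] < v - 2
      · rw [if_pos hc]
        have hPnew : ∀ j (hj : j < values.length), j < (lo + hi) / 2 + 1 → values[j] < v - 2 :=
          fun j hj hjlt =>
            lt_of_le_of_lt (mono_vals values hp j ((lo + hi) / 2) (by omega) hmlen) hc
        obtain ⟨ha, hb, hc2, hd2⟩ := ih ((lo + hi) / 2 + 1) hi h1 (by omega) (by omega) hPnew hNP
        exact ⟨by omega, hb, hc2, hd2⟩
      · rw [if_neg hc]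
        have hNPnew : ∀ j (hj : j < values.length), (lo + hi) / 2 ≤ j → j < k →
            ¬(values[j] < v - 2) := fun j hj hle hlt habs =>
          hc (lt_of_le_of_lt (mono_vals values hp ((lo + hi) / 2) j hle hj) habs)
        obtain ⟨ha, hb, hc2, hd2⟩ := ih lo ((lo + hi) / 2) (by omega) (by omega) (by omega) hP hNPnew
        exact ⟨ha, by omega, hc2, hd2⟩
    · rw [if_neg hlh]
      exact ⟨le_rfl, h2, hP, fun j hj hle hlt => hNP j hj (by omega) hlt⟩

lemma bsLoop_correct (values : List Int) (v : Int) (hp : values.Pairwise (· ≤ ·)) (k : Nat)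
    (hk : k ≤ values.length) :
    bsLoop values v 0 k ≤ k ∧
    (∀ j (hj : j < values.length), j < bsLoop values v 0 k → values[j] < v - 2) ∧
    (∀ j (hj : j < values.length), bsLoop values v 0 k ≤ j → j < k → ¬(values[j] < v - 2)) := by
  unfold bsLoop
  have h := bsGo_correct values v hp k hk (k - 0) 0 k le_rfl (by omega) (by omega)
    (fun j hj h => absurd h (Nat.not_lt_zero j))
    (fun j hj h1 h2 => absurd h2 (by omega))
  exact ⟨h.2.1, h.2.2.1, h.2.2.2⟩

lemma aScan_eq (values dp : List Int) (v : Int) :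
    ∀ (k lo : Nat), k ≤ values.length → lo ≤ k →
    (∀ j (hj : j < values.length), j < lo → values[j] < v - 2) →
    (∀ j (hj : j < values.length), lo ≤ j → j < k → ¬(values[j] < v - 2)) →
    aScan values dp v (PySem.List.pyRange ((k : Int) - 1) (-1) (-1)) =
      if 0 < lo then (PySem.List.pyGet? dp ((lo : Int) - 1)).getD 0 else 0 := by
  intro k
  induction k with
  | zero =>
    intro lo hk hlo hP hNP
    have hlo0 : lo = 0 := by omega
    subst hlo0
    rw [show ((0 : Nat) : Int) - 1 = -1 by decide]
    rw [PySem.List.pyRange_neg_one_eq_nil (by decide : (-1 : Int) ≤ -1)]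
    simp [aScan]
  | succ k ih =>
    intro lo hk hlo hP hNP
    have hcast : ((k + 1 : Nat) : Int) - 1 = ((k : Nat) : Int) := by push_cast; ring
    rw [hcast, PySem.List.pyRange_neg_one_cons (by omega : (-1 : Int) < ((k : Nat) : Int))]
    simp only [aScan]
    have hklen : k < values.length := by omega
    have hval : (PySem.List.pyGet? values ((k : Nat) : Int)).getD 0 = values[k] := by
      rw [PySem.List.pyGet?_natCast, List.getElem?_eq_getElem hklen]; rfl
    rw [hval]
    by_cases hlok : lo = k + 1
    · have hPk : values[k] < v - 2 := hP k hklen (by omega)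
      rw [if_pos (by omega : v - values[k] > 2), if_pos (by omega : 0 < lo)]
      subst hlok
      rw [hcast]
    · have hNPk : ¬(values[k] < v - 2) := hNP k hklen (by omega) (by omega)
      rw [if_neg (by omega : ¬(v - values[k] > 2))]
      exact ih lo (by omega) (by omega) hP (fun j hj h1 h2 => hNP j hj h1 (by omega))

lemma BfoldK_zero (values : List Int) (f : Int → Int) : BfoldK values f 0 = [] := rfl

lemma BfoldK_succ (values : List Int) (f : Int → Int) (k : Nat) (hk : k < values.length) :
    BfoldK values f (k + 1)
      = stepB values f (BfoldK values f k) (((k : Nat) : Int), values[k]) := by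
  unfold BfoldK
  rw [List.take_add_one, PySem.List.getElem?_enumerate, List.getElem?_eq_getElem hk]
  simp [List.foldl_append]

lemma BfoldK_len (values : List Int) (f : Int → Int) :
    ∀ k, k ≤ values.length → (BfoldK values f k).length = k := by
  intro k
  induction k with
  | zero => intro _; rfl
  | succ k ih =>
    intro hk
    rw [BfoldK_succ values f k (by omega)]
    simp [stepB, ih (by omega)]

lemma AfoldK_zero (values : List Int) (f : Int → Int) : AfoldK values f 0 = dpInit values f := by
  unfold AfoldK
  rw [show ((0 : Nat) : Int) = 0 by decide, PySem.List.pyRange_one_eq_nil (by decide : (0:Int) ≤ 0)]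
  rfl

lemma AfoldK_succ (values : List Int) (f : Int → Int) (k : Nat) :
    AfoldK values f (k + 1) = stepA values f (AfoldK values f k) ((k : Nat) : Int) := by
  unfold AfoldK
  rw [show ((k + 1 : Nat) : Int) = ((k : Nat) : Int) + 1 by push_cast; ring]
  rw [PySem.List.pyRange_one_succ_right (by omega : (0 : Int) ≤ ((k : Nat) : Int))]
  rw [List.foldl_append]
  rfl

lemma invAB (values : List Int) (f : Int → Int) (hp : values.Pairwise (· ≤ ·))
    (hn : 2 ≤ values.length) :
    ∀ k, 1 ≤ k → k ≤ values.length →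
      AfoldK values f k = BfoldK values f k ++ List.replicate (values.length - k) 0 := by
  intro k
  induction k with
  | zero => intro h; omega
  | succ k ih =>
    intro h1 hk1
    by_cases hk0 : k = 0
    · subst hk0
      obtain ⟨m, hm⟩ : ∃ m, values.length = m + 2 := ⟨values.length - 2, by omega⟩
      have h0len : 0 < values.length := by omega
      have hv0 : (PySem.List.pyGet? values 0).getD 0 = values[0] := by
        rw [PySem.List.pyGet?_zero, List.getElem?_eq_getElem h0len]; rfl
      have hinit : dpInit values f = f values[0] :: List.replicate (m + 1) 0 := by
        unfold dpInit
        rw [hv0, PySem.List.pySetD_of_nonneg _ _ (le_refl (0 : Int))]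
        rw [show (0 : Int).toNat = 0 from rfl, hm, List.replicate_succ, List.set_cons_zero]
      have hL : AfoldK values f (0 + 1)
          = (max 0 (0 + f values[0]) : Int) :: List.replicate (m + 1) (0 : Int) := by
        rw [AfoldK_succ, AfoldK_zero]
        simp only [stepA, Nat.cast_zero]
        rw [show (0 : Int) - 1 = -1 by decide]
        rw [PySem.List.pyRange_neg_one_eq_nil (by decide : (-1 : Int) ≤ -1)]
        simp only [aScan]
        rw [hinit, hv0, PySem.List.pyGet?_neg_one]
        rw [show (f values[0] :: List.replicate (m + 1) (0 : Int)).getLast? = some 0 from by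
          rw [List.getLast?_eq_getElem?]; simp]
        rw [PySem.List.pySetD_of_nonneg _ _ (le_refl (0 : Int))]
        rw [show (0 : Int).toNat = 0 from rfl, List.set_cons_zero]
        rfl
      have hR : BfoldK values f (0 + 1) = [(max 0 (0 + f values[0]) : Int)] := by
        rw [BfoldK_succ values f 0 h0len, BfoldK_zero]
        simp only [stepB, Nat.cast_zero]
        rw [show (0 : Int).toNat = 0 from rfl]
        rw [show bsLoop values values[0] 0 0 = 0 from rfl]
        simp
      rw [hL, hR, show values.length - (0 + 1) = m + 1 by omega]
      simp
    · have hk : 1 ≤ k := by omega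
      have hkn : k < values.length := by omega
      have hIH := ih hk (by omega)
      have hlen : (BfoldK values f k).length = k := BfoldK_len values f k (by omega)
      rw [AfoldK_succ, BfoldK_succ values f k hkn, hIH]
      set Bk := BfoldK values f k with hBk
      simp only [stepA, stepB]
      have hv : (PySem.List.pyGet? values ((k : Nat) : Int)).getD 0 = values[k] := by
        rw [PySem.List.pyGet?_natCast, List.getElem?_eq_getElem hkn]; rfl
      rw [hv]
      -- previous dp value: A reads (Bk ++ replicate)[k-1], B reads Bk's last
      have hprev : (PySem.List.pyGet? (Bk ++ List.replicate (values.length - k) 0)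
          (((k : Nat) : Int) - 1)).getD 0 = (Bk[k-1]?).getD 0 := by
        rw [show ((k : Nat) : Int) - 1 = ((k - 1 : Nat) : Int) by omega]
        rw [PySem.List.pyGet?_natCast, List.getElem?_append_left (by omega)]
      have hne : Bk ≠ [] := by
        intro h; rw [h] at hlen; simp at hlen; omega
      have hskip : (if Bk.isEmpty then (0:Int) else (PySem.List.pyGet? Bk (-1)).getD 0)
          = (Bk[k-1]?).getD 0 := by
        rw [if_neg (by simpa [List.isEmpty_iff] using hne)]
        rw [PySem.List.pyGet?_neg_one, List.getLast?_eq_getElem?, hlen]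
      rw [hprev, hskip]
      -- the scanned value equals the binary-search value
      rw [show Int.toNat ((k : Nat) : Int) = k from Int.toNat_natCast k]
      obtain ⟨hlo, hPs, hNPs⟩ := bsLoop_correct values values[k] hp k (by omega)
      set lo := bsLoop values values[k] 0 k with hloDef
      have hscan := aScan_eq values (Bk ++ List.replicate (values.length - k) 0) values[k]
        k lo (by omega) hlo hPs hNPs
      rw [hscan]
      have htake : (if 0 < lo then (PySem.List.pyGet? (Bk ++ List.replicate (values.length - k) 0)
            ((lo : Int) - 1)).getD 0 else 0)
          = (if 0 < lo then (PySem.List.pyGet? Bk ((lo : Int) - 1)).getD 0 else 0) := by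
        by_cases h0 : 0 < lo
        · rw [if_pos h0, if_pos h0]
          rw [show ((lo : Nat) : Int) - 1 = ((lo - 1 : Nat) : Int) by omega]
          rw [PySem.List.pyGet?_natCast, PySem.List.pyGet?_natCast,
            List.getElem?_append_left (by omega)]
        · rw [if_neg h0, if_neg h0]
      rw [htake]
      -- the write at index k appends to Bk
      rw [PySem.List.pySetD_of_nonneg _ _ (Int.natCast_nonneg k), Int.toNat_natCast]
      obtain ⟨m2, hm2⟩ : ∃ m2, values.length - k = m2 + 1 := ⟨values.length - k - 1, by omega⟩
      rw [hm2, List.replicate_succ]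
      rw [List.set_append_right _ _ (by omega : Bk.length ≤ k)]
      rw [show k - Bk.length = 0 by omega, List.set_cons_zero]
      rw [show values.length - (k + 1) = m2 by omega]
      rw [List.append_cons]

lemma sol_eq_alt_big (cards : List Int) (hn : 2 ≤ (valsOf cards).length) :
    solution cards = solution_alt cards := by
  have hinv := invAB (valsOf cards) (fOf cards) (sorted_vals cards) hn
    (valsOf cards).length (by omega) le_rfl
  have hlen := BfoldK_len (valsOf cards) (fOf cards) (valsOf cards).length le_rfl
  rw [solution_eq, alt_eq, if_neg (by omega : ¬ (valsOf cards).length = 1)]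
  rw [hinv, show (valsOf cards).length - (valsOf cards).length = 0 by omega,
    List.replicate_zero, List.append_nil]
  set Bn := BfoldK (valsOf cards) (fOf cards) (valsOf cards).length with hBn
  have hne : Bn ≠ [] := by intro h; rw [h] at hlen; simp at hlen; omega
  rw [if_neg (by simpa [List.isEmpty_iff] using hne)]
  rw [PySem.List.pyGet?_neg_one, List.getLast?_eq_getElem?, hlen]
  rw [show ((valsOf cards).length : Int) - 1 = (((valsOf cards).length - 1 : Nat) : Int) by omega]
  rw [PySem.List.pyGet?_natCast]

lemma sol_single (cards : List Int) (k0 : Int) (hv : valsOf cards = [k0]) :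
    solution cards = fOf cards k0 := by
  rw [solution_eq, hv]
  rfl

lemma alt_single (cards : List Int) (k0 : Int) (hv : valsOf cards = [k0]) :
    solution_alt cards = max 0 (fOf cards k0) := by
  rw [alt_eq, hv]
  show max 0 (0 + fOf cards k0) = max 0 (fOf cards k0)
  rw [zero_add]

lemma vals_eq_single (cards : List Int) (h : Int) (hne : cards ≠ [])
    (hall : ∀ c ∈ cards, c = h) : valsOf cards = [h] := by
  have hmem : h ∈ valsOf cards := by
    rw [mem_vals]
    obtain ⟨c, cs, rfl⟩ : ∃ c cs, cards = c :: cs := by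
      cases cards with
      | nil => exact absurd rfl hne
      | cons c cs => exact ⟨c, cs, rfl⟩
    have := hall c (List.mem_cons_self)
    rw [← this]; exact List.mem_cons_self
  have hallv : ∀ x ∈ valsOf cards, x = h := fun x hx => hall x ((mem_vals cards x).mp hx)
  have hnd := nodup_vals cards
  cases hvv : valsOf cards with
  | nil => rw [hvv] at hmem; exact absurd hmem (List.not_mem_nil)
  | cons v t =>
    have hvh : v = h := hallv v (by rw [hvv]; exact List.mem_cons_self)
    cases ht : t with
    | nil => rw [hvh]
    | cons b t' =>
      have hbh : b = h := hallv b (by rw [hvv, ht]; exact List.mem_cons_of_mem _ List.mem_cons_self)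
      rw [hvv, ht] at hnd
      have : v ∉ (b :: t') := (List.nodup_cons.mp hnd).1
      exact absurd (by rw [hvh, ← hbh]; exact List.mem_cons_self) this

lemma headI_mem' (cards : List Int) (hne : cards ≠ []) : cards.headI ∈ cards := by
  cases cards with
  | nil => exact absurd rfl hne
  | cons c cs => exact List.mem_cons_self

theorem main_unchanged : ∀ (cards : List Int), Pre_solution cards → ¬ D_solution cards →
    solution cards = solution_alt cards := by
  intro cards hpre hnd
  have hvne : valsOf cards ≠ [] := by
    obtain ⟨c, cs, rfl⟩ : ∃ c cs, cards = c :: cs := by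
      cases cards with
      | nil => exact absurd rfl hpre
      | cons c cs => exact ⟨c, cs, rfl⟩
    exact List.ne_nil_of_mem ((mem_vals _ c).mpr List.mem_cons_self)
  rcases Nat.lt_or_ge (valsOf cards).length 2 with hsmall | hbig
  · -- single distinct value
    have h1 : (valsOf cards).length = 1 := by
      have := List.length_pos_iff.mpr hvne
      omega
    obtain ⟨k0, hv⟩ := List.length_eq_one_iff.mp h1
    rw [sol_single cards k0 hv, alt_single cards k0 hv]
    -- all cards equal k0, and ¬D forces k0 ≥ 0
    have hall : ∀ c ∈ cards, c = k0 := by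
      intro c hc
      have : c ∈ valsOf cards := (mem_vals cards c).mpr hc
      rw [hv] at this
      simpa using this
    have hheadI : cards.headI = k0 := hall _ (headI_mem' cards hpre)
    have hk0 : 0 ≤ k0 := by
      by_contra hneg
      refine hnd ?_
      unfold D_solution
      exact ⟨hpre, by rw [hheadI]; exact hall, by rw [hheadI]; omega⟩
    have hfk : 0 ≤ fOf cards k0 := by
      unfold fOf
      rw [pm_getD']
      exact mul_nonneg hk0 (by positivity)
    omega
  · exact sol_eq_alt_big cards hbig

-- ===== VERDICT (by name: the statement is the Claim_ definition above) =====
theorem solution_spec : Claim_unchanged_solution := by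
  intro cards _ hpre hnd
  exact main_unchanged cards hpre hnd

-- ===== VERDICT (by name: the statement is the Claim_ definition above) =====
theorem solution_changed : Claim_changed_solution := by unfold Claim_changed_solution; decide
theorem solution_tight : Claim_exact_solution := by
  intro cards _ hpre hD
  unfold D_solution at hD
  obtain ⟨hne, hall, hneg⟩ := hD
  have hv := vals_eq_single cards cards.headI hne hall
  rw [sol_single cards _ hv, alt_single cards _ hv]
  have hcount : cards.count cards.headI = cards.length :=
    List.count_eq_length.mpr (fun b hb => (hall b hb).symm)
  have hlenpos : 0 < cards.length := List.length_pos_iff.mpr hne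
  have hA : fOf cards cards.headI < 0 := by
    unfold fOf
    rw [pm_getD', hcount]
    exact mul_neg_of_neg_of_pos hneg (by exact_mod_cast hlenpos)
  have hB : (0 : Int) ≤ max 0 (fOf cards cards.headI) := le_max_left _ _
  omega
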